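-- pv_equiv track=rewrite | github.com/azadkavian/CLUS-MCDA | cluster.py | getFinalRanks
-- ===== SOURCE A (Python) =====
-- def getFinalRanks(yRanks, zRanks, uRanks):
--     """
--     """
--     rankTuples = []
--     data = []
--     for i in range(len(yRanks)):
--         row = [yRanks[i], zRanks[i], uRanks[i]]
--         row.sort()
--         rankTuples.append(row)
--         data.append(row)
--
--     rankTuples.sort()
--     fRanks = [rankTuples.index(row) + 1 for row in data]
--     return fRanks
-- ===== SOURCE B (Python) =====
-- def getFinalRanks(yRanks, zRanks, uRanks):
--     def key3(a, b, c):
--         lo = min(a, b, c)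
--         hi = max(a, b, c)
--         return (lo, a + b + c - lo - hi, hi)
--     data = [key3(a, b, c) for a, b, c in zip(yRanks, zRanks, uRanks)]
--     return [1 + sum(other < row for other in data) for row in data]
-- ===== Notes on version B (the rewrite author's own statement) =====
-- stated objective: alternative
-- what changed: B replaces A's sort-the-triples / global-sort / repeated list.index pipeline with a sort-free strategy: each triple is normalised to (min, mid, max) by closed-form min/max arithmetic over a zip of the three lists, and each rank is 1 plus the count of strictly smaller normalised triples.
import Mathlib
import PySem

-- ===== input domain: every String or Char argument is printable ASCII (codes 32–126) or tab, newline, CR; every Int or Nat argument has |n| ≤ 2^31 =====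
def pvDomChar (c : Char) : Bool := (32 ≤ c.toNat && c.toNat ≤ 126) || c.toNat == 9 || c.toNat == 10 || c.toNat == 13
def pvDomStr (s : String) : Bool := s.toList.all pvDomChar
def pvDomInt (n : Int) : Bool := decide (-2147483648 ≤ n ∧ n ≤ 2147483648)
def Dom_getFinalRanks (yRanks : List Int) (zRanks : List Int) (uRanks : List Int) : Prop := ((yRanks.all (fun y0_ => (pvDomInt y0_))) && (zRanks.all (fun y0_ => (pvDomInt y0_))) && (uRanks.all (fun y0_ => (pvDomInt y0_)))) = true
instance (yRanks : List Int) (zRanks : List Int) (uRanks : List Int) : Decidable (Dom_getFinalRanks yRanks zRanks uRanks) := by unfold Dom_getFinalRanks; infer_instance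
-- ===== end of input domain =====

-- B drops A's triple sort, global sort and repeated .index lookup: triples are normalised to
-- (min, mid, max) by closed-form min/max arithmetic over a zip, and each rank is 1 + the count
-- of strictly smaller normalised triples. Equivalence is on return values.

-- ===== PORT A =====
def getFinalRanks (yRanks : List Int) (zRanks : List Int) (uRanks : List Int) : List Int :=
  -- the loop builds the same sorted 3-row into both rankTuples and data
  let data : List (List Int) :=
    (PySem.List.pyRange 0 (yRanks.length : Int) 1).map (fun i =>
      PySem.List.sorted
        [PySem.List.pyGetD yRanks i 0, PySem.List.pyGetD zRanks i 0, PySem.List.pyGetD uRanks i 0]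
        (fun r => r) false)
  let rankTuples : List (List Int) := PySem.List.sorted data (fun r => r) false
  -- rankTuples.index(row): Python list lex order is Lean's '<' on List Int; row is always present,
  -- so .getD 0 never takes its default
  data.map (fun row => ((PySem.List.index? rankTuples row).getD 0 : Int) + 1)

-- ===== PORT B =====
-- key3(a, b, c) = (min, mid, max) of the triple, mid by arithmetic
def pvKey3 (a : Int) (b : Int) (c : Int) : Int × Int × Int :=
  let lo := min a (min b c)
  let hi := max a (max b c)
  (lo, a + b + c - lo - hi, hi)

-- Python's lexicographic '<' on 3-tuples of ints, written out componentwise (exact)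
def pvTupLt (p : Int × Int × Int) (q : Int × Int × Int) : Bool :=
  decide (p.1 < q.1 ∨ (p.1 = q.1 ∧ (p.2.1 < q.2.1 ∨ (p.2.1 = q.2.1 ∧ p.2.2 < q.2.2))))

def getFinalRanks_alt (yRanks : List Int) (zRanks : List Int) (uRanks : List Int) : List Int :=
  let data : List (Int × Int × Int) :=
    (yRanks.zip (zRanks.zip uRanks)).map (fun t => pvKey3 t.1 t.2.1 t.2.2)
  data.map (fun row => 1 + (data.countP (fun other => pvTupLt other row) : Int))

-- ===== PRECONDITION & SPEC =====
-- Pre_ excludes exactly the inputs where zRanks[i] / uRanks[i] raises IndexError (lists shorter than yRanks).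
def Pre_getFinalRanks (yRanks : List Int) (zRanks : List Int) (uRanks : List Int) : Prop :=
  yRanks.length ≤ zRanks.length ∧ yRanks.length ≤ uRanks.length
instance (yRanks : List Int) (zRanks : List Int) (uRanks : List Int) : Decidable (Pre_getFinalRanks yRanks zRanks uRanks) := by unfold Pre_getFinalRanks; infer_instance
def pvWitness_getFinalRanks : List Int × List Int × List Int := ([1, 2, 1], [2, 1, 2], [0, 3, 0])
def Spec_getFinalRanks (yRanks : List Int) (zRanks : List Int) (uRanks : List Int) (out : List Int) : Prop := out = getFinalRanks_alt yRanks zRanks uRanks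
instance (yRanks : List Int) (zRanks : List Int) (uRanks : List Int) (out : List Int) : Decidable (Spec_getFinalRanks yRanks zRanks uRanks out) := by unfold Spec_getFinalRanks; infer_instance

-- ===== CLAIM (what is proved, stated in full; the proofs are below) =====
def Claim_equal_getFinalRanks : Prop := ∀ (yRanks : List Int) (zRanks : List Int) (uRanks : List Int), Dom_getFinalRanks yRanks zRanks uRanks → Pre_getFinalRanks yRanks zRanks uRanks → Spec_getFinalRanks yRanks zRanks uRanks (getFinalRanks yRanks zRanks uRanks)

-- ===== LEMMAS AND PROOFS =====

-- triple as a 3-element list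
def pvTl (p : Int × Int × Int) : List Int := [p.1, p.2.1, p.2.2]

-- in a ≤-sorted list, the first index of a present element counts the strictly smaller elements
theorem index_sorted_eq_countP (s : List (List Int)) (x : List Int)
    (hp : s.Pairwise (fun a b => a ≤ b)) (hx : x ∈ s) :
    PySem.List.index? s x = some (s.countP (fun o => decide (o < x))) := by
  induction s with
  | nil => cases hx
  | cons a t ih =>
    rcases List.pairwise_cons.mp hp with ⟨ha, ht⟩
    by_cases hax : a = x
    · subst hax
      rw [PySem.List.index?_cons_self]
      have hz : t.countP (fun o => decide (o < a)) = 0 := by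
        rw [List.countP_eq_zero]
        intro o ho
        simpa using not_lt_of_ge (ha o ho)
      simp [hz]
    · have hxt : x ∈ t := by
        rcases List.mem_cons.mp hx with h | h
        · exact absurd h.symm hax
        · exact h
      rw [PySem.List.index?_cons_of_ne t hax, ih ht hxt]
      have halt : a < x := lt_of_le_of_ne (ha x hxt) hax
      simp [halt]

-- sorting a 3-element list equals the closed-form (min, mid, max) triple
theorem sort3_eq (a b c : Int) :
    PySem.List.sorted [a, b, c] (fun r => r) false = pvTl (pvKey3 a b c) := by
  simp only [pvKey3, pvTl]
  rw [PySem.List.sorted_eq_foldl_insertBy]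
  simp only [List.foldl, PySem.List.insertBy]
  split_ifs <;> simp_all only [decide_eq_true_eq, not_lt, PySem.List.insertBy]
  all_goals try split_ifs
  all_goals try simp_all only [not_lt]
  all_goals try simp only [List.cons.injEq, and_true]
  all_goals omega

-- list lex '<' on 3-element lists is pvTupLt
theorem listLt_iff_tupLt (p q : Int × Int × Int) :
    decide (pvTl p < pvTl q) = pvTupLt p q := by
  obtain ⟨pa, pb, pc⟩ := p
  obtain ⟨qa, qb, qc⟩ := q
  simp only [pvTl, pvTupLt]
  rw [decide_eq_decide]
  constructor
  · intro h
    replace h : List.Lex (· < ·) [pa, pb, pc] [qa, qb, qc] := h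
    cases h with
    | rel h => exact Or.inl h
    | cons h =>
      refine Or.inr ⟨rfl, ?_⟩
      cases h with
      | rel h => exact Or.inl h
      | cons h =>
        refine Or.inr ⟨rfl, ?_⟩
        cases h with
        | rel h => exact h
        | cons h => cases h
  · intro h
    show List.Lex (· < ·) [pa, pb, pc] [qa, qb, qc]
    rcases h with h | ⟨h1, h | ⟨h2, h⟩⟩
    · exact List.Lex.rel h
    · rw [h1]; exact List.Lex.cons (List.Lex.rel h)
    · rw [h1, h2]; exact List.Lex.cons (List.Lex.cons (List.Lex.rel h))

-- A's data equals B's data mapped to 3-lists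
theorem dataA_eq_map (yRanks zRanks uRanks : List Int)
    (h1 : yRanks.length ≤ zRanks.length) (h2 : yRanks.length ≤ uRanks.length) :
    (PySem.List.pyRange 0 (yRanks.length : Int) 1).map (fun i =>
      PySem.List.sorted
        [PySem.List.pyGetD yRanks i 0, PySem.List.pyGetD zRanks i 0, PySem.List.pyGetD uRanks i 0]
        (fun r => r) false)
    = ((yRanks.zip (zRanks.zip uRanks)).map (fun t => pvKey3 t.1 t.2.1 t.2.2)).map pvTl := by
  have hlen : (yRanks.zip (zRanks.zip uRanks)).length = yRanks.length := by
    simp [List.length_zip]; omega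
  apply List.ext_getElem
  · simp [PySem.List.length_pyRange_one, hlen]
  · intro i h1 h2
    have hi : i < yRanks.length := by
      simpa [PySem.List.length_pyRange_one] using h1
    simp only [List.getElem_map, PySem.List.getElem_pyRange_one, List.getElem_zip, zero_add,
      PySem.List.pyGetD_natCast]
    rw [List.getD_eq_getElem _ _ hi, List.getD_eq_getElem _ _ (by omega),
      List.getD_eq_getElem _ _ (by omega)]
    exact sort3_eq _ _ _

-- ===== VERDICT (by name: the statement is the Claim_ definition above) =====
theorem getFinalRanks_spec : Claim_equal_getFinalRanks := by
  intro yRanks zRanks uRanks _ hpre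
  show _ = _
  unfold getFinalRanks getFinalRanks_alt
  rw [dataA_eq_map yRanks zRanks uRanks hpre.1 hpre.2]
  set dB : List (Int × Int × Int) :=
    (yRanks.zip (zRanks.zip uRanks)).map (fun t => pvKey3 t.1 t.2.1 t.2.2) with hdB
  rw [List.map_map]
  apply List.map_congr_left
  intro row hrow
  have hperm := PySem.List.sorted_perm (dB.map pvTl) (fun r => r) false
  have hmem : pvTl row ∈ PySem.List.sorted (dB.map pvTl) (fun r => r) false :=
    hperm.mem_iff.mpr (List.mem_map_of_mem hrow)
  have hpair : (PySem.List.sorted (dB.map pvTl) (fun r => r) false).Pairwise (fun a b => a ≤ b) := by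
    have h := PySem.List.sorted_pairwise (dB.map pvTl) (fun r => r)
    convert h using 3
  simp only [Function.comp]
  rw [index_sorted_eq_countP _ _ hpair hmem, hperm.countP_eq, List.countP_map]
  simp only [Option.getD_some, Function.comp_def, listLt_iff_tupLt]
  ring
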